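-- pv_equiv track=rewrite | github.com/Mariusmarten/SpatialMemory | common/preprocess.py | recode_actions
-- ===== SOURCE A (Python) =====
-- def recode_actions(dataset, n):
--     single_class_encoding_dic = {}
--     counter = 0
--
--     if n == 1:
--         for i in range(0, 4):
--             single_class_encoding_dic[str([i])] = counter
--             counter += 1
--     elif n == 2:
--         for i in range(0, 4):
--             for j in range(0, 4):
--                 single_class_encoding_dic[str([i, j])] = counter
--                 counter += 1
--     elif n == 3:
--         for i in range(0, 4):
--             for j in range(0, 4):
--                 for k in range(0, 4):
--                     single_class_encoding_dic[str([i, j, k])] = counter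
--                     counter += 1
--     elif n == 4:
--         for i in range(0, 4):
--             for j in range(0, 4):
--                 for k in range(0, 4):
--                     for h in range(0, 4):
--                         single_class_encoding_dic[str([i, j, k, h])] = counter
--                         counter += 1
--
--     actions_recoded = []
--     for actions in dataset['actions']:
--         actions_recoded.append([single_class_encoding_dic[str(actions)]]) # recode all actions
--
--     dataset['actions'] = actions_recoded
--
--     return dataset, counter, single_class_encoding_dic
-- ===== SOURCE B (Python) =====
-- def _base4_digits(code, n):
--     digits = []
--     for _ in range(n):
--         digits.append(code % 4)
--         code //= 4
--     digits.reverse()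
--     return digits
--
--
-- def recode_actions(dataset, n):
--     # Every length-n combination of the 4 actions is a base-4 number: build the
--     # encoding table by decoding each class index into its digit list, instead
--     # of enumerating combinations with one hand-written loop nest per n.
--     encoding = {}
--     if 1 <= n <= 4:
--         encoding = {str(_base4_digits(code, n)): code for code in range(4 ** n)}
--     dataset['actions'] = [[encoding[str(actions)]] for actions in dataset['actions']]
--     return dataset, len(encoding), encoding
-- ===== Notes on version B (the rewrite author's own statement) =====
-- stated objective: alternative
-- what changed: Replaces A's four-way if/elif ladder of hand-written nested range(4) loops and its running counter by base-4 arithmetic: the table is a single dict comprehension that decodes each class index into its digit list (code % 4 / code //= 4), the counter is len(encoding), and the recode is a comprehension over the table; Pre_ excludes the inputs on which A raises KeyError (missing 'actions' key, or nonempty actions with n outside 1..4, wrong-length or out-of-range entries) and association lists with duplicate keys, which do not represent a Python dict.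
import Mathlib
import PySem

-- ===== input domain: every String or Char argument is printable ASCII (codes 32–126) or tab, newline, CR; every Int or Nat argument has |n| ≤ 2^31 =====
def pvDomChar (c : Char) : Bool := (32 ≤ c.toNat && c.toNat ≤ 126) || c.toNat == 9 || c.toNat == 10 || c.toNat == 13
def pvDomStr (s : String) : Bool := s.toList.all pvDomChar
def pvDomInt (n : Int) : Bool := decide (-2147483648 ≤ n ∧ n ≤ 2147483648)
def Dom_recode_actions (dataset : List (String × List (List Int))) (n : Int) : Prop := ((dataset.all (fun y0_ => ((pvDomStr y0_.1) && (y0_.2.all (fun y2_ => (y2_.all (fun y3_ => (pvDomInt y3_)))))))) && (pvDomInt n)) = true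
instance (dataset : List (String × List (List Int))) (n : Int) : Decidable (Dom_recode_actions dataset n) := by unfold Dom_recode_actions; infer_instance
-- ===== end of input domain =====

-- B replaces A's four-way if/elif ladder of hand-written nested range(4) loops and its
-- running counter by base-4 arithmetic: a single dict comprehension decodes each class
-- index into its digit list, and the counter is len(encoding) (objective: alternative).
-- Both A and B mutate dataset['actions'] in place in Python (the same mutation).

-- chars of Python's str(list-of-ints), e.g. "[0, 1]"  (shared primitive: both Pythons call str())
def pvKeyChars : List Int → List Char
  | [] => []
  | [x] => PySem.Int.toChars x
  | x :: y :: t => PySem.Int.toChars x ++ [',', ' '] ++ pvKeyChars (y :: t)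

def pvKey (a : List Int) : String := String.ofList ('[' :: pvKeyChars a ++ [']'])

-- ===== PORT A =====
-- the dict-building if/elif chain of A (nested loops over range(0,4), counter incremented per insert)
def pvEncA (n : Int) : PySem.Dict String Int × Int :=
  if n = 1 then
    (PySem.List.pyRange 0 4 1).foldl (fun s i =>
      (s.1.insert (pvKey [i]) s.2, s.2 + 1)) (PySem.Dict.empty, 0)
  else if n = 2 then
    (PySem.List.pyRange 0 4 1).foldl (fun s i =>
      (PySem.List.pyRange 0 4 1).foldl (fun s j =>
        (s.1.insert (pvKey [i, j]) s.2, s.2 + 1)) s) (PySem.Dict.empty, 0)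
  else if n = 3 then
    (PySem.List.pyRange 0 4 1).foldl (fun s i =>
      (PySem.List.pyRange 0 4 1).foldl (fun s j =>
        (PySem.List.pyRange 0 4 1).foldl (fun s k =>
          (s.1.insert (pvKey [i, j, k]) s.2, s.2 + 1)) s) s) (PySem.Dict.empty, 0)
  else if n = 4 then
    (PySem.List.pyRange 0 4 1).foldl (fun s i =>
      (PySem.List.pyRange 0 4 1).foldl (fun s j =>
        (PySem.List.pyRange 0 4 1).foldl (fun s k =>
          (PySem.List.pyRange 0 4 1).foldl (fun s h =>
            (s.1.insert (pvKey [i, j, k, h]) s.2, s.2 + 1)) s) s) s) (PySem.Dict.empty, 0)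
  else (PySem.Dict.empty, 0)

-- dict lookups that would raise KeyError in Python return the default here; Pre_ excludes those inputs
def recode_actions (dataset : List (String × List (List Int))) (n : Int) : (List (String × List (List Int))) × Int × (List (String × Int)) :=
  let s := pvEncA n
  let d := PySem.Dict.mk dataset
  let acts := d.getD "actions" []
  let recoded := acts.foldl (fun r a => r ++ [[(s.1.get? (pvKey a)).getD 0]]) []
  (((d.insert "actions" recoded).items), s.2, s.1.items)

-- ===== PORT B =====
-- helper _base4_digits(code, n) of Source B (append code % 4, code //= 4, then reverse)
def pvDigitsB (code : Int) (n : Int) : List Int :=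
  (((PySem.List.pyRange 0 n 1).foldl
      (fun (s : List Int × Int) _ => (s.1 ++ [PySem.Int.mod s.2 4], PySem.Int.floordiv s.2 4))
      ([], code)).1).reverse

-- the guarded dict comprehension of Source B building the table
def pvEncB (n : Int) : PySem.Dict String Int :=
  if 1 ≤ n ∧ n ≤ 4 then
    (PySem.List.pyRange 0 ((4 : Int) ^ n.toNat) 1).foldl
      (fun d code => d.insert (pvKey (pvDigitsB code n)) code) PySem.Dict.empty
  else PySem.Dict.empty

-- dict lookups that would raise KeyError in Python return the default here; Pre_ excludes those inputs
def recode_actions_alt (dataset : List (String × List (List Int))) (n : Int) : (List (String × List (List Int))) × Int × (List (String × Int)) :=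
  let enc := pvEncB n
  let d := PySem.Dict.mk dataset
  let recoded := (d.getD "actions" []).map (fun a => [(enc.get? (pvKey a)).getD 0])
  (((d.insert "actions" recoded).items), (enc.size : Int), enc.items)

-- ===== PRECONDITION & SPEC =====
-- Pre_ excludes exactly (i) inputs where Python A raises KeyError: no 'actions' key, or some
-- action list not encodable (n outside 1..4 with nonempty actions, wrong length, or an entry
-- outside 0..3); and (ii) association lists with duplicate keys, which do not represent a
-- Python dict (A's argument is a real dict, which cannot hold duplicate keys).
def Pre_recode_actions (dataset : List (String × List (List Int))) (n : Int) : Prop :=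
  (dataset.map Prod.fst).Nodup ∧
  (PySem.Dict.mk dataset).contains "actions" = true ∧
  (((PySem.Dict.mk dataset).getD "actions" []) = [] ∨
    (1 ≤ n ∧ n ≤ 4 ∧ ∀ a ∈ ((PySem.Dict.mk dataset).getD "actions" []),
      (a.length : Int) = n ∧ ∀ x ∈ a, 0 ≤ x ∧ x < 4))
instance (dataset : List (String × List (List Int))) (n : Int) : Decidable (Pre_recode_actions dataset n) := by unfold Pre_recode_actions; infer_instance

def pvWitness_recode_actions : (List (String × List (List Int))) × Int := ([("actions", [[0], [3]])], 1)

def Spec_recode_actions (dataset : List (String × List (List Int))) (n : Int) (out : (List (String × List (List Int))) × Int × (List (String × Int))) : Prop := out = recode_actions_alt dataset n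
instance (dataset : List (String × List (List Int))) (n : Int) (out : (List (String × List (List Int))) × Int × (List (String × Int))) : Decidable (Spec_recode_actions dataset n out) := by unfold Spec_recode_actions; infer_instance

-- ===== CLAIM (what is proved, stated in full; the proofs are below) =====
def Claim_equal_recode_actions : Prop := ∀ (dataset : List (String × List (List Int))) (n : Int), Dom_recode_actions dataset n → Pre_recode_actions dataset n → Spec_recode_actions dataset n (recode_actions dataset n)

-- ===== LEMMAS AND PROOFS =====

def pvT (n : Int) : Int := (4 : Int) ^ n.toNat

-- A's insert step, and the list of combos A's nested loops run through
def pvGA (s : PySem.Dict String Int × Int) (a : List Int) : PySem.Dict String Int × Int :=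
  (s.1.insert (pvKey a) s.2, s.2 + 1)

def pvR4 : List Int := PySem.List.pyRange 0 4 1

def pvCombos (n : Int) : List (List Int) :=
  if n = 1 then pvR4.map (fun i => [i])
  else if n = 2 then pvR4.flatMap (fun i => pvR4.map (fun j => [i, j]))
  else if n = 3 then pvR4.flatMap (fun i => pvR4.flatMap (fun j => pvR4.map (fun k => [i, j, k])))
  else if n = 4 then pvR4.flatMap (fun i => pvR4.flatMap (fun j => pvR4.flatMap (fun k => pvR4.map (fun h => [i, j, k, h]))))
  else []

def pvPairs : List (List Int) → Int → List (String × Int)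
  | [], _ => []
  | a :: l, c => (pvKey a, c) :: pvPairs l (c + 1)

lemma pvEncA_foldl (n : Int) (hn : n = 1 ∨ n = 2 ∨ n = 3 ∨ n = 4) :
    pvEncA n = (pvCombos n).foldl pvGA (PySem.Dict.empty, 0) := by
  rcases hn with h | h | h | h <;> subst h <;>
    simp [pvEncA, pvCombos, pvR4, pvGA, List.foldl_map, List.foldl_flatMap]

lemma pvEncA_else (n : Int) (hn : ¬ (n = 1 ∨ n = 2 ∨ n = 3 ∨ n = 4)) :
    pvEncA n = (PySem.Dict.empty, 0) := by
  have h1 : ¬ n = 1 := fun h => hn (Or.inl h)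
  have h2 : ¬ n = 2 := fun h => hn (Or.inr (Or.inl h))
  have h3 : ¬ n = 3 := fun h => hn (Or.inr (Or.inr (Or.inl h)))
  have h4 : ¬ n = 4 := fun h => hn (Or.inr (Or.inr (Or.inr h)))
  simp [pvEncA, h1, h2, h3, h4]

def pvCodeOf (a : List Int) : Int := a.foldl (fun acc x => acc * 4 + x) 0

set_option maxRecDepth 100000 in
lemma pvCombos_eq (n : Int) (hn : n = 1 ∨ n = 2 ∨ n = 3 ∨ n = 4) :
    pvCombos n = (PySem.List.pyRange 0 (pvT n) 1).map (fun c => pvDigitsB c n) := by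
  rcases hn with h | h | h | h <;> subst h <;> decide

set_option maxRecDepth 100000 in
lemma pvCode_digits (n : Int) (hn : n = 1 ∨ n = 2 ∨ n = 3 ∨ n = 4) :
    ∀ c ∈ PySem.List.pyRange 0 (pvT n) 1, pvCodeOf (pvDigitsB c n) = c := by
  rcases hn with h | h | h | h <;> subst h <;> decide

set_option maxRecDepth 100000 in
lemma pvCombos_bounds (n : Int) (hn : n = 1 ∨ n = 2 ∨ n = 3 ∨ n = 4) :
    ∀ a ∈ pvCombos n, (a.length : Int) = n ∧ ∀ x ∈ a, 0 ≤ x ∧ x < 4 := by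
  rcases hn with h | h | h | h <;> subst h <;> decide

-- single-digit facts
lemma pvDigit_len (x : Int) (h0 : 0 ≤ x) (h4 : x < 4) : (PySem.Int.toChars x).length = 1 := by
  interval_cases x <;> decide

lemma pvDigit_inj (x y : Int) (hx0 : 0 ≤ x) (hx4 : x < 4) (hy0 : 0 ≤ y) (hy4 : y < 4)
    (h : PySem.Int.toChars x = PySem.Int.toChars y) : x = y := by
  interval_cases x <;> interval_cases y <;> first | rfl | (exfalso; revert h; decide)

lemma pvKeyChars_inj : ∀ (a b : List Int), (∀ x ∈ a, 0 ≤ x ∧ x < 4) → (∀ x ∈ b, 0 ≤ x ∧ x < 4) →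
    a.length = b.length → pvKeyChars a = pvKeyChars b → a = b := by
  intro a
  induction a with
  | nil =>
    intro b _ _ hlen _
    cases b with
    | nil => rfl
    | cons y u => simp at hlen
  | cons x t ih =>
    intro b ha hb hlen h
    cases b with
    | nil => simp at hlen
    | cons y u =>
      have hx := ha x (by simp)
      have hy := hb y (by simp)
      cases t with
      | nil =>
        cases u with
        | nil =>
          have : x = y := by
            apply pvDigit_inj x y hx.1 hx.2 hy.1 hy.2
            simpa [pvKeyChars] using h
          rw [this]
        | cons u1 u2 => simp at hlen
      | cons t1 t2 =>
        cases u with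
        | nil => simp at hlen
        | cons u1 u2 =>
          have hsh : pvKeyChars (x :: t1 :: t2)
              = PySem.Int.toChars x ++ ([',', ' '] ++ pvKeyChars (t1 :: t2)) := by
            simp [pvKeyChars]
          have hsh2 : pvKeyChars (y :: u1 :: u2)
              = PySem.Int.toChars y ++ ([',', ' '] ++ pvKeyChars (u1 :: u2)) := by
            simp [pvKeyChars]
          rw [hsh, hsh2] at h
          have hlx := pvDigit_len x hx.1 hx.2
          have hly := pvDigit_len y hy.1 hy.2
          obtain ⟨hh, htl⟩ := List.append_inj h (by rw [hlx, hly])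
          have hx_eq : x = y := pvDigit_inj x y hx.1 hx.2 hy.1 hy.2 hh
          have htail : pvKeyChars (t1 :: t2) = pvKeyChars (u1 :: u2) := by
            simpa using htl
          have : (t1 :: t2) = (u1 :: u2) := by
            apply ih (u1 :: u2) (fun z hz => ha z (by simp [hz])) (fun z hz => hb z (by simp [hz]))
              (by simpa using hlen) htail
          rw [hx_eq, this]

lemma pvKey_inj (a b : List Int) (ha : ∀ x ∈ a, 0 ≤ x ∧ x < 4) (hb : ∀ x ∈ b, 0 ≤ x ∧ x < 4)
    (hlen : a.length = b.length) (h : pvKey a = pvKey b) : a = b := by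
  apply pvKeyChars_inj a b ha hb hlen
  have h2 : ('[' :: pvKeyChars a ++ [']']) = ('[' :: pvKeyChars b ++ [']']) := by
    have := congrArg String.toList h
    simpa [pvKey] using this
  have h3 := List.tail_eq_of_cons_eq h2
  exact List.append_cancel_right h3

lemma pvFoldl_gA : ∀ (l : List (List Int)) (d : PySem.Dict String Int) (c : Int),
    (∀ a ∈ l, d.contains (pvKey a) = false) → ((l.map pvKey).Nodup) →
    (l.foldl pvGA (d, c)).1.items = d.items ++ pvPairs l c ∧
      (l.foldl pvGA (d, c)).2 = c + l.length := by
  intro l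
  induction l with
  | nil => intro d c _ _; simp [pvPairs]
  | cons a t ih =>
    intro d c hfresh hnodup
    have hfa : d.contains (pvKey a) = false := hfresh a (by simp)
    have hstep : pvGA (d, c) a = (d.insert (pvKey a) c, c + 1) := rfl
    have hfresh' : ∀ b ∈ t, (d.insert (pvKey a) c).contains (pvKey b) = false := by
      intro b hbmem
      rw [PySem.Dict.contains_insert]
      have hne : pvKey b ≠ pvKey a := by
        intro hcontra
        have : pvKey a ∈ t.map pvKey := by
          exact List.mem_map.mpr ⟨b, hbmem, hcontra⟩
        simp only [List.map_cons, List.nodup_cons] at hnodup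
        exact hnodup.1 this
      rw [beq_eq_false_iff_ne.mpr hne, hfresh b (by simp [hbmem])]
      rfl
    have hnodup' : (t.map pvKey).Nodup := by
      simp only [List.map_cons, List.nodup_cons] at hnodup
      exact hnodup.2
    have hitems : (d.insert (pvKey a) c).items = d.items ++ [(pvKey a, c)] := by
      rw [PySem.Dict.items_insert, hfa]
      simp
    obtain ⟨ih1, ih2⟩ := ih (d.insert (pvKey a) c) (c + 1) hfresh' hnodup'
    constructor
    · rw [List.foldl_cons, hstep, ih1, hitems, pvPairs]
      simp
    · rw [List.foldl_cons, hstep, ih2]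
      simp
      omega

lemma pvPairs_map_range (f : Int → List Int) : ∀ (k : Nat) (a : Int),
    pvPairs ((PySem.List.pyRange a (a + k) 1).map f) a
      = (PySem.List.pyRange a (a + k) 1).map (fun c => (pvKey (f c), c)) := by
  intro k
  induction k with
  | zero =>
    intro a
    rw [PySem.List.pyRange_one_eq_nil (by omega)]
    rfl
  | succ m ih =>
    intro a
    rw [PySem.List.pyRange_one_cons (by push_cast; omega)]
    have harr : a + (↑(m + 1) : Int) = (a + 1) + ↑m := by push_cast; omega
    rw [harr]
    simp only [List.map_cons, pvPairs]
    rw [ih (a + 1)]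

-- everything about one admissible n, assembled
lemma pvEnc_main (n : Int) (hn : n = 1 ∨ n = 2 ∨ n = 3 ∨ n = 4) :
    (pvEncA n).1 = pvEncB n ∧ (pvEncA n).2 = ((pvEncB n).size : Int) := by
  have ht0 : 0 ≤ pvT n := by rcases hn with h | h | h | h <;> subst h <;> decide
  have hn14 : 1 ≤ n ∧ n ≤ 4 := by rcases hn with h | h | h | h <;> subst h <;> norm_num
  have hceq := pvCombos_eq n hn
  have hcd := pvCode_digits n hn
  have hcb := pvCombos_bounds n hn
  -- digits of an in-range code are a combo
  have hdig_mem : ∀ c ∈ PySem.List.pyRange 0 (pvT n) 1, pvDigitsB c n ∈ pvCombos n := by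
    intro c hc
    rw [hceq]
    exact List.mem_map_of_mem hc
  -- the keys over the combos are pairwise distinct
  have hnodup : ((pvCombos n).map pvKey).Nodup := by
    rw [hceq, List.map_map]
    apply List.Nodup.map_on _ (PySem.List.nodup_pyRange_one 0 (pvT n))
    intro c hc c' hc' hkey
    have hm := hdig_mem c hc
    have hm' := hdig_mem c' hc'
    have hb := hcb _ hm
    have hb' := hcb _ hm'
    have hlen : (pvDigitsB c n).length = (pvDigitsB c' n).length := by
      have := hb.1
      have := hb'.1
      omega
    have := pvKey_inj _ _ hb.2 hb'.2 hlen hkey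
    rw [← hcd c hc, ← hcd c' hc', this]
  have hfresh : ∀ a ∈ pvCombos n, (PySem.Dict.empty : PySem.Dict String Int).contains (pvKey a) = false := by
    intro a _
    exact PySem.Dict.contains_empty _
  obtain ⟨hit, hcnt⟩ := pvFoldl_gA (pvCombos n) PySem.Dict.empty 0 hfresh hnodup
  rw [pvEncA_foldl n hn] at *
  -- the pair list L both builds produce
  have hrange : PySem.List.pyRange 0 (pvT n) 1
      = PySem.List.pyRange 0 ((0 : Int) + ((pvT n).toNat : Int)) 1 := by
    congr 1
    omega
  have hpairs : pvPairs (pvCombos n) 0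
      = (PySem.List.pyRange 0 (pvT n) 1).map (fun c => (pvKey (pvDigitsB c n), c)) := by
    rw [hceq, hrange, pvPairs_map_range]
  have hitemsA : ((pvCombos n).foldl pvGA (PySem.Dict.empty, 0)).1.items
      = (PySem.List.pyRange 0 (pvT n) 1).map (fun c => (pvKey (pvDigitsB c n), c)) := by
    rw [hit, hpairs]
    have he : (PySem.Dict.empty : PySem.Dict String Int).items = [] := rfl
    rw [he, List.nil_append]
  -- B's dict comprehension has the same items
  have hLnodup : ((PySem.List.pyRange 0 (pvT n) 1).map (fun c => pvKey (pvDigitsB c n))).Nodup := by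
    have : ((pvCombos n).map pvKey).Nodup := hnodup
    rw [hceq, List.map_map] at this
    exact this
  have hitemsB : (pvEncB n).items
      = (PySem.List.pyRange 0 (pvT n) 1).map (fun c => (pvKey (pvDigitsB c n), c)) := by
    unfold pvEncB
    rw [if_pos hn14]
    rw [show ((4 : Int) ^ n.toNat) = pvT n from rfl,
      PySem.Dict.items_foldl_insert_fresh (PySem.List.pyRange 0 (pvT n) 1)
        (fun c => pvKey (pvDigitsB c n)) (fun c => c) PySem.Dict.empty
        (fun c _ => PySem.Dict.contains_empty _) hLnodup]
    rfl
  have hdicteq : ((pvCombos n).foldl pvGA (PySem.Dict.empty, 0)).1 = pvEncB n := by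
    apply PySem.Dict.ext
    rw [hitemsA, hitemsB]
  refine ⟨hdicteq, ?_⟩
  rw [hcnt]
  have hsize : (pvEncB n).size = ((PySem.List.pyRange 0 (pvT n) 1).map (fun c => (pvKey (pvDigitsB c n), c))).length := by
    show (pvEncB n).items.length = _
    rw [hitemsB]
  have hlencombos : (pvCombos n).length = (pvT n - 0).toNat := by
    rw [hceq, List.length_map, PySem.List.length_pyRange_one]
  rw [hsize, List.length_map, PySem.List.length_pyRange_one, hlencombos]
  omega

lemma pvEncB_else (n : Int) (hn : ¬ (n = 1 ∨ n = 2 ∨ n = 3 ∨ n = 4)) :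
    pvEncB n = PySem.Dict.empty := by
  unfold pvEncB
  rw [if_neg]
  omega

-- ===== VERDICT (by name: the statement is the Claim_ definition above) =====
theorem recode_actions_spec : Claim_equal_recode_actions := by
  intro dataset n _hdom hpre
  obtain ⟨_hnd, _hcont, hacts⟩ := hpre
  show recode_actions dataset n = recode_actions_alt dataset n
  by_cases hn : n = 1 ∨ n = 2 ∨ n = 3 ∨ n = 4
  · obtain ⟨hdict, hcnt⟩ := pvEnc_main n hn
    simp only [recode_actions, recode_actions_alt]
    rw [PySem.List.foldl_append_singleton_eq_map, List.nil_append, hdict, hcnt]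
  · rcases hacts with hemp | ⟨h1, h4, _⟩
    · simp only [recode_actions, recode_actions_alt, hemp, List.foldl_nil, List.map_nil]
      rw [pvEncA_else n hn, pvEncB_else n hn]
      simp [PySem.Dict.empty, PySem.Dict.size]
    · exact absurd (by omega : n = 1 ∨ n = 2 ∨ n = 3 ∨ n = 4) hn
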